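-- pv_equiv track=rewrite | github.com/MicheleSpecchia/probity | src/pmx/jobs/monitor_from_pipeline.py | _normalize_warning_records
-- ===== SOURCE A (Python) =====
-- from collections.abc import Mapping
-- from typing import Any
--
-- def _normalize_warning_records(records: list[Mapping[str, str]]) -> tuple[dict[str, str], ...]:
--     deduped: dict[tuple[str, str, str], dict[str, str]] = {}
--     for record in records:
--         code = _optional_text(record.get("code")) or "unknown_warning"
--         message = _optional_text(record.get("message")) or ""
--         source = _optional_text(record.get("source")) or "monitoring"
--         deduped[(code, message, source)] = {
--             "code": code,
--             "message": message,
--             "source": source,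
--         }
--     keys = sorted(deduped.keys(), key=lambda item: item)
--     return tuple(deduped[key] for key in keys)
--
-- def _optional_text(raw: Any) -> str | None:
--     if raw is None:
--         return None
--     value = str(raw).strip()
--     return value or None
-- ===== SOURCE B (Python) =====
-- from itertools import groupby
--
--
-- def _normalize_warning_records(records):
--     triples = []
--     for record in records:
--         triples.append((
--             _text_or(record.get("code"), "unknown_warning"),
--             _text_or(record.get("message"), ""),
--             _text_or(record.get("source"), "monitoring"),
--         ))
--     triples.sort()
--     out = []
--     for (code, message, source), _group in groupby(triples):
--         out.append({"code": code, "message": message, "source": source})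
--     return tuple(out)
--
--
-- def _text_or(raw, default):
--     if raw is None:
--         return default
--     value = str(raw).strip()
--     return value if value else default
-- ===== Notes on version B (the rewrite author's own statement) =====
-- stated objective: alternative
-- what changed: A dedupes records into a dict keyed by the normalized (code, message, source) triple and then sorts the dict's keys; B normalizes every record to a triple first, sorts the whole list of triples, then drops adjacent duplicates in one groupby pass and rebuilds the dicts from the surviving triples.
import Mathlib
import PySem

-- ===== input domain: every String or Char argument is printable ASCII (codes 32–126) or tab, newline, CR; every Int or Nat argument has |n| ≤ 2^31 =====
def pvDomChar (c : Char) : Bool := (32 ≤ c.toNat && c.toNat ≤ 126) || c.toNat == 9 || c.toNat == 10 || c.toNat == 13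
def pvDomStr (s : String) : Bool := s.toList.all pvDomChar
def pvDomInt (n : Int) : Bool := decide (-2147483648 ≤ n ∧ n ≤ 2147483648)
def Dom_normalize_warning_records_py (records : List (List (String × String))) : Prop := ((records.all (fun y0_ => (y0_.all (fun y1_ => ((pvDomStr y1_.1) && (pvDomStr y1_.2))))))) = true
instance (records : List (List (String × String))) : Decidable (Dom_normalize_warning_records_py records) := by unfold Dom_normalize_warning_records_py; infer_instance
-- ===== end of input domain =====

-- B replaces A's dedupe-into-a-dict-then-sort-the-keys with sort-first-then-drop-adjacent-duplicates
-- (objective: alternative decomposition, same result).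

-- Python's comparison of (str, str, str) tuples is the lexicographic order: encode it with Prod.Lex.
def tripleKey (t : String × String × String) : Lex (String × Lex (String × String)) :=
  toLex (t.1, toLex t.2)

-- ===== PORT A =====
-- _optional_text(raw): None stays None, otherwise strip; empty string becomes None.
def pyOptionalText (raw : Option String) : Option String :=
  match raw with
  | none => none
  | some raw =>
    let value := PySem.Str.strip raw
    if value = "" then none else some value

-- the (code, message, source) triple A computes for one record ('x or default' on a
-- None-or-nonempty value is getD)
def pyWarnTriple (record : List (String × String)) : String × String × String :=
  ((pyOptionalText ((PySem.Dict.mk record).get? "code")).getD "unknown_warning",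
   (pyOptionalText ((PySem.Dict.mk record).get? "message")).getD "",
   (pyOptionalText ((PySem.Dict.mk record).get? "source")).getD "monitoring")

-- the value dict {"code": …, "message": …, "source": …}
def pyWarnDict (t : String × String × String) : List (String × String) :=
  [("code", t.1), ("message", t.2.1), ("source", t.2.2)]

def normalize_warning_records_py (records : List (List (String × String))) : List (List (String × String)) :=
  let deduped := records.foldl
    (fun d record => d.insert (pyWarnTriple record) (pyWarnDict (pyWarnTriple record)))
    PySem.Dict.empty
  let keys := PySem.List.sorted deduped.keys tripleKey false
  keys.map (fun key => deduped.getD key [])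

-- ===== PORT B =====
-- _text_or(raw, default)
def altTextOr (raw : Option String) (default : String) : String :=
  match raw with
  | none => default
  | some raw =>
    let value := PySem.Str.strip raw
    if value = "" then default else value

def altTriple (record : List (String × String)) : String × String × String :=
  (altTextOr ((PySem.Dict.mk record).get? "code") "unknown_warning",
   altTextOr ((PySem.Dict.mk record).get? "message") "",
   altTextOr ((PySem.Dict.mk record).get? "source") "monitoring")

-- itertools.groupby over a sorted list, keeping one representative per run
def altDedupAdj (l : List (String × String × String)) : List (String × String × String) :=
  match l with
  | [] => []
  | [x] => [x]
  | x :: y :: rest =>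
    if x = y then altDedupAdj (y :: rest) else x :: altDedupAdj (y :: rest)

def normalize_warning_records_py_alt (records : List (List (String × String))) : List (List (String × String)) :=
  let triples := PySem.List.sorted (records.map altTriple) tripleKey false
  (altDedupAdj triples).map (fun t => [("code", t.1), ("message", t.2.1), ("source", t.2.2)])

-- ===== PRECONDITION & SPEC =====
def Spec_normalize_warning_records_py (records : List (List (String × String))) (out : List (List (String × String))) : Prop := out = normalize_warning_records_py_alt records
instance (records : List (List (String × String))) (out : List (List (String × String))) : Decidable (Spec_normalize_warning_records_py records out) := by unfold Spec_normalize_warning_records_py; infer_instance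

-- ===== CLAIM (what is proved, stated in full; the proofs are below) =====
def Claim_equal_normalize_warning_records_py : Prop := ∀ (records : List (List (String × String))), Dom_normalize_warning_records_py records → Spec_normalize_warning_records_py records (normalize_warning_records_py records)

-- ===== LEMMAS AND PROOFS =====

theorem tripleKey_injective : Function.Injective tripleKey := by
  intro a b h
  simp only [tripleKey, toLex_inj, Prod.mk.injEq] at h
  exact Prod.ext h.1 h.2

theorem altTextOr_eq (raw : Option String) (d : String) :
    altTextOr raw d = (pyOptionalText raw).getD d := by
  cases raw with
  | none => rfl
  | some s =>
    simp only [altTextOr, pyOptionalText]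
    split_ifs <;> rfl

theorem altTriple_eq (record : List (String × String)) :
    altTriple record = pyWarnTriple record := by
  simp [altTriple, pyWarnTriple, altTextOr_eq]

theorem mem_altDedupAdj (a : String × String × String) (l : List (String × String × String)) :
    a ∈ altDedupAdj l ↔ a ∈ l := by
  fun_induction altDedupAdj l with
  | case1 => simp
  | case2 x => simp
  | case3 y rest ih => rw [ih]; simp
  | case4 x y rest hne ih => simp [ih]

theorem pairwise_lt_altDedupAdj (l : List (String × String × String)) :
    l.Pairwise (fun a b => tripleKey a ≤ tripleKey b) →
    (altDedupAdj l).Pairwise (fun a b => tripleKey a < tripleKey b) := by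
  fun_induction altDedupAdj l with
  | case1 => exact fun _ => List.Pairwise.nil
  | case2 x => intro _; simp
  | case3 y rest ih => exact fun h => ih (List.Pairwise.sublist (by simp) h)
  | case4 x y rest hne ih =>
    intro h
    rw [List.pairwise_cons] at h ⊢
    refine ⟨?_, ih h.2⟩
    intro z hz
    have hz' : z ∈ y :: rest := (mem_altDedupAdj z (y :: rest)).mp hz
    have hxy : tripleKey x < tripleKey y :=
      lt_of_le_of_ne (h.1 y (by simp)) (fun he => hne (tripleKey_injective he))
    rcases List.mem_cons.mp hz' with rfl | hzr
    · exact hxy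
    · have := List.pairwise_cons.mp h.2
      exact lt_of_lt_of_le hxy (this.1 z hzr)

theorem getD_warnFold (l : List (List (String × String)))
    (d : PySem.Dict (String × String × String) (List (String × String)))
    (k : String × String × String) :
    (l.foldl (fun d record => d.insert (pyWarnTriple record) (pyWarnDict (pyWarnTriple record))) d).getD k []
      = if k ∈ l.map pyWarnTriple then pyWarnDict k else d.getD k [] := by
  induction l generalizing d with
  | nil => simp
  | cons r l ih =>
    simp only [List.foldl_cons, ih, List.map_cons, List.mem_cons]
    rw [PySem.Dict.getD_insert]
    by_cases h1 : k ∈ l.map pyWarnTriple <;> by_cases h2 : k = pyWarnTriple r <;>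
      simp [h1, h2]

-- ===== VERDICT (by name: the statement is the Claim_ definition above) =====
theorem normalize_warning_records_py_spec : Claim_equal_normalize_warning_records_py := by
  intro records _
  unfold Spec_normalize_warning_records_py normalize_warning_records_py normalize_warning_records_py_alt
  simp only [List.map_congr_left (fun r _ => altTriple_eq r)]
  set xs := records.map pyWarnTriple with hxs
  set deduped := records.foldl
    (fun d record => d.insert (pyWarnTriple record) (pyWarnDict (pyWarnTriple record)))
    PySem.Dict.empty with hded
  have hkeys : deduped.keys = PySem.Set.ofList xs := by
    rw [hded, PySem.Dict.keys_foldl_insert_key]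
    simp only [PySem.Dict.keys_empty, PySem.Set.update_nil_left]
    rw [← hxs]
  -- the sorted distinct keys are exactly B's sorted-then-adjacent-deduped triples
  have hsorted : PySem.List.sorted (PySem.Set.ofList xs) tripleKey false
      = altDedupAdj (PySem.List.sorted xs tripleKey false) := by
    apply PySem.List.sorted_eq_of_perm_of_pairwise_lt
    · have hpl := pairwise_lt_altDedupAdj _ (PySem.List.sorted_pairwise xs tripleKey)
      have hnd : (altDedupAdj (PySem.List.sorted xs tripleKey false)).Nodup :=
        hpl.imp (fun hlt => fun he => by subst he; exact lt_irrefl _ hlt)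
      refine (List.perm_ext_iff_of_nodup hnd (PySem.Set.nodup_ofList xs)).mpr ?_
      intro a
      rw [mem_altDedupAdj, PySem.List.mem_sorted, PySem.Set.mem_ofList]
    · exact pairwise_lt_altDedupAdj _ (PySem.List.sorted_pairwise xs tripleKey)
  rw [hkeys, hsorted]
  apply List.map_congr_left
  intro k hk
  have hkx : k ∈ xs := by
    rw [mem_altDedupAdj, PySem.List.mem_sorted] at hk
    exact hk
  rw [hded, getD_warnFold]
  simp [hxs ▸ hkx, pyWarnDict]
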